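-- pv_equiv track=rewrite | github.com/Gitudon/DMP | GUI/game/func.py | tmpmake
-- ===== SOURCE A (Python) =====
-- def tmpmake(cards,mode):
--     tmp=[[],[],[],[]]
--     #mode:0-showcards,1-showmanazone,2-showbattlezone,3-showshield
--     for i in range(len(cards)):
--         if mode==0:
--             buf="cards/"+cards[i][0]
--         elif mode in [1,2]:
--             if cards[i][2]:
--                 buf="uramen/ura"
--             else:
--                 buf="cards/"+cards[i][0][0]
--         elif mode==3:
--             if cards[i][1]:
--                 buf="uramen/ura"
--             else:
--                 buf="cards/"+cards[i][0][0]
--         if i<=23: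
--             tmp[0].append("GUI/image/"+buf+".jpg")
--         elif i<=47:
--             tmp[1].append("GUI/image/"+buf+".jpg")
--         elif i<=71:
--             tmp[2].append("GUI/image/"+buf+".jpg")
--         else:
--             tmp[3].append("GUI/image/"+buf+".jpg")
--     return tmp
-- ===== SOURCE B (Python) =====
-- def tmpmake(cards, mode):
--     # stage 1: pick the per-card path rule once, outside the loop
--     if mode == 0:
--         key = lambda c: "cards/" + c[0]
--     elif mode in (1, 2):
--         key = lambda c: "uramen/ura" if c[2] else "cards/" + c[0][0]
--     elif mode == 3:
--         key = lambda c: "uramen/ura" if c[1] else "cards/" + c[0][0]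
--     # stage 2: map it over the cards
--     paths = ["GUI/image/" + key(c) + ".jpg" for c in cards]
--     # stage 3: recursively peel three 24-chunks; the remainder is the 4th bucket
--     def chunk(p, k):
--         if k == 0:
--             return [p]
--         return [p[:24]] + chunk(p[24:], k - 1)
--     return chunk(paths, 3)
-- ===== Notes on version B (the rewrite author's own statement) =====
-- stated objective: simpler
-- what changed: Staged decomposition: the mode branch is hoisted out of the loop into a one-time selector function, paths are produced by a single map, and the four buckets come from a recursive 24-chunk peel instead of A's per-index conditional appends into four pre-made lists.
import Mathlib
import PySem

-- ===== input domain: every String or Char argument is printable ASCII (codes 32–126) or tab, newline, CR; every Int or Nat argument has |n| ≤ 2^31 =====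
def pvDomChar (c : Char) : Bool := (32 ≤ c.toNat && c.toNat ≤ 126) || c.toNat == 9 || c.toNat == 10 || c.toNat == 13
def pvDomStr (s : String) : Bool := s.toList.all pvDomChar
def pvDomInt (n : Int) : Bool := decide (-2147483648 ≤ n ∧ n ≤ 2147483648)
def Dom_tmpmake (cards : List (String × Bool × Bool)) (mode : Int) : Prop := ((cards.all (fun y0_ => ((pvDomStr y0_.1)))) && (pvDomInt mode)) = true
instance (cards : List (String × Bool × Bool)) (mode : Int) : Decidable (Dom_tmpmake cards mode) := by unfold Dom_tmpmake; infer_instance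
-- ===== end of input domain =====

-- B stages the work: the mode branch is hoisted into a one-time selector, a single map
-- builds the paths, and a recursive 24-chunk peel forms the buckets; objective: simpler.
-- Pre_ excludes the inputs where Python A raises (invalid mode on a nonempty list →
-- UnboundLocalError; empty card name reached by the name[0] branch → IndexError);
-- outside Pre_ the helpers return a dummy "".

-- ===== PORT A =====
-- per-iteration buf computation of A, same branch order as the source
def pvBuf (mode : Int) (card : String × Bool × Bool) : String :=
  if mode = 0 then "cards/" ++ card.1
  else if mode = 1 ∨ mode = 2 then
    (if card.2.2 then "uramen/ura"
     else "cards/" ++ (match PySem.Str.pyGet? card.1 0 with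
                       | some ch => String.ofList [ch]
                       | none => ""))   -- none = IndexError in Python; excluded by Pre_
  else if mode = 3 then
    (if card.2.1 then "uramen/ura"
     else "cards/" ++ (match PySem.Str.pyGet? card.1 0 with
                       | some ch => String.ofList [ch]
                       | none => ""))
  else ""  -- UnboundLocalError in Python; excluded by Pre_

def pvStepA (mode : Int)
    (t : List String × List String × List String × List String)
    (p : Int × (String × Bool × Bool)) :
    List String × List String × List String × List String :=
  let buf := pvBuf mode p.2
  if p.1 ≤ 23 then (t.1 ++ ["GUI/image/" ++ buf ++ ".jpg"], t.2.1, t.2.2.1, t.2.2.2)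
  else if p.1 ≤ 47 then (t.1, t.2.1 ++ ["GUI/image/" ++ buf ++ ".jpg"], t.2.2.1, t.2.2.2)
  else if p.1 ≤ 71 then (t.1, t.2.1, t.2.2.1 ++ ["GUI/image/" ++ buf ++ ".jpg"], t.2.2.2)
  else (t.1, t.2.1, t.2.2.1, t.2.2.2 ++ ["GUI/image/" ++ buf ++ ".jpg"])

def tmpmake (cards : List (String × Bool × Bool)) (mode : Int) : List (List String) :=
  -- for i in range(len(cards)): … cards[i] …  ≙ fold over the indexed elements
  let t := (PySem.List.enumerate cards 0).foldl (pvStepA mode) ([], [], [], [])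
  [t.1, t.2.1, t.2.2.1, t.2.2.2]

-- ===== PORT B =====
-- stage 1 of Source B: the selector picked once by mode
def pvKey (mode : Int) : (String × Bool × Bool) → String :=
  if mode = 0 then fun c => "cards/" ++ c.1
  else if mode = 1 ∨ mode = 2 then fun c =>
    if c.2.2 then "uramen/ura"
    else "cards/" ++ (match PySem.Str.pyGet? c.1 0 with
                      | some ch => String.ofList [ch]
                      | none => "")     -- IndexError in Python; excluded by Pre_
  else if mode = 3 then fun c =>
    if c.2.1 then "uramen/ura"
    else "cards/" ++ (match PySem.Str.pyGet? c.1 0 with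
                      | some ch => String.ofList [ch]
                      | none => "")
  else fun _ => ""  -- NameError in Python (key unbound); excluded by Pre_ on nonempty cards

-- stage 3 of Source B: recursive 24-chunk peel
def pvChunk : List String → Nat → List (List String)
  | p, 0 => [p]
  | p, k + 1 => [PySem.List.slice p none (some 24)] ++ pvChunk (PySem.List.slice p (some 24) none) k

def tmpmake_alt (cards : List (String × Bool × Bool)) (mode : Int) : List (List String) :=
  let paths := cards.map (fun c => "GUI/image/" ++ pvKey mode c ++ ".jpg")
  pvChunk paths 3

-- ===== PRECONDITION & SPEC =====
-- Pre_ excludes exactly the inputs where A raises: a nonempty list with a mode outside {0,1,2,3}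
-- (UnboundLocalError), or a mode-1/2/3 call whose relevant flag is false on a card with empty name (IndexError).
def Pre_tmpmake (cards : List (String × Bool × Bool)) (mode : Int) : Prop :=
  cards = [] ∨ mode = 0 ∨
  ((mode = 1 ∨ mode = 2) ∧ ∀ c ∈ cards, c.2.2 = true ∨ c.1 ≠ "") ∨
  (mode = 3 ∧ ∀ c ∈ cards, c.2.1 = true ∨ c.1 ≠ "")
instance (cards : List (String × Bool × Bool)) (mode : Int) : Decidable (Pre_tmpmake cards mode) := by
  unfold Pre_tmpmake; infer_instance

def pvWitness_tmpmake : (List (String × Bool × Bool)) × Int := ([("ab", true, false)], 1)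

def Spec_tmpmake (cards : List (String × Bool × Bool)) (mode : Int) (out : List (List String)) : Prop := out = tmpmake_alt cards mode
instance (cards : List (String × Bool × Bool)) (mode : Int) (out : List (List String)) : Decidable (Spec_tmpmake cards mode out) := by unfold Spec_tmpmake; infer_instance

-- ===== CLAIM (what is proved, stated in full; the proofs are below) =====
def Claim_equal_tmpmake : Prop := ∀ (cards : List (String × Bool × Bool)) (mode : Int), Dom_tmpmake cards mode → Pre_tmpmake cards mode → Spec_tmpmake cards mode (tmpmake cards mode)

-- ===== LEMMAS AND PROOFS =====

def pvItem (mode : Int) (c : String × Bool × Bool) : String :=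
  "GUI/image/" ++ pvBuf mode c ++ ".jpg"

lemma key_eq_buf (mode : Int) (c : String × Bool × Bool) : pvKey mode c = pvBuf mode c := by
  unfold pvKey pvBuf; split_ifs <;> simp_all

lemma foldA_eq (mode : Int) : ∀ (cards : List (String × Bool × Bool)) (n : Nat)
    (a b c d : List String),
    (PySem.List.enumerate cards (n : Int)).foldl (pvStepA mode) (a, b, c, d) =
      (a ++ (cards.map (pvItem mode)).take (24 - n),
       b ++ ((cards.map (pvItem mode)).take (48 - n)).drop (24 - n),
       c ++ ((cards.map (pvItem mode)).take (72 - n)).drop (48 - n),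
       d ++ (cards.map (pvItem mode)).drop (72 - n)) := by
  intro cards
  induction cards with
  | nil => intro n a b c d; simp [PySem.List.enumerate_nil]
  | cons x xs ih =>
    intro n a b c d
    rw [PySem.List.enumerate_cons, List.foldl_cons]
    have hcast : (n : Int) + 1 = ((n + 1 : Nat) : Int) := by push_cast; ring
    rw [hcast]
    by_cases h1 : n ≤ 23
    · rw [show pvStepA mode (a, b, c, d) ((n : Int), x)
          = (a ++ [pvItem mode x], b, c, d) by
        simp only [pvStepA, pvItem]
        rw [if_pos (show ((n:Int)) ≤ 23 by exact_mod_cast h1)]]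
      rw [ih]
      rw [show (24 - n) = (24 - (n + 1)) + 1 by omega,
          show (48 - n) = (48 - (n + 1)) + 1 by omega,
          show (72 - n) = (72 - (n + 1)) + 1 by omega]
      simp [List.take_succ_cons, List.drop_succ_cons]
    · by_cases h2 : n ≤ 47
      · rw [show pvStepA mode (a, b, c, d) ((n : Int), x)
            = (a, b ++ [pvItem mode x], c, d) by
          simp only [pvStepA, pvItem]
          rw [if_neg (show ¬ ((n:Int) ≤ 23) by exact_mod_cast h1),
              if_pos (show ((n:Int)) ≤ 47 by exact_mod_cast h2)]]
        rw [ih]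
        rw [show (24 - n) = 0 by omega, show (24 - (n + 1)) = 0 by omega,
            show (48 - n) = (48 - (n + 1)) + 1 by omega,
            show (72 - n) = (72 - (n + 1)) + 1 by omega]
        simp [List.take_succ_cons, List.drop_succ_cons]
      · by_cases h3 : n ≤ 71
        · rw [show pvStepA mode (a, b, c, d) ((n : Int), x)
              = (a, b, c ++ [pvItem mode x], d) by
            simp only [pvStepA, pvItem]
            rw [if_neg (show ¬ ((n:Int) ≤ 23) by exact_mod_cast h1),
                if_neg (show ¬ ((n:Int) ≤ 47) by exact_mod_cast h2),
                if_pos (show ((n:Int)) ≤ 71 by exact_mod_cast h3)]]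
          rw [ih]
          rw [show (24 - n) = 0 by omega, show (24 - (n + 1)) = 0 by omega,
              show (48 - n) = 0 by omega, show (48 - (n + 1)) = 0 by omega,
              show (72 - n) = (72 - (n + 1)) + 1 by omega]
          simp [List.take_succ_cons, List.drop_succ_cons]
        · rw [show pvStepA mode (a, b, c, d) ((n : Int), x)
              = (a, b, c, d ++ [pvItem mode x]) by
            simp only [pvStepA, pvItem]
            rw [if_neg (show ¬ ((n:Int) ≤ 23) by exact_mod_cast h1),
                if_neg (show ¬ ((n:Int) ≤ 47) by exact_mod_cast h2),
                if_neg (show ¬ ((n:Int) ≤ 71) by exact_mod_cast h3)]]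
          rw [ih]
          rw [show (24 - n) = 0 by omega, show (24 - (n + 1)) = 0 by omega,
              show (48 - n) = 0 by omega, show (48 - (n + 1)) = 0 by omega,
              show (72 - n) = 0 by omega, show (72 - (n + 1)) = 0 by omega]
          simp

lemma chunk3_eq (p : List String) :
    pvChunk p 3 = [p.take 24, (p.take 48).drop 24, (p.take 72).drop 48, p.drop 72] := by
  simp only [pvChunk, PySem.List.slice_to _ (by norm_num : (0:Int) ≤ 24),
    PySem.List.slice_from _ (by norm_num : (0:Int) ≤ 24),
    show Int.toNat 24 = 24 from rfl, List.drop_drop]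
  norm_num [List.drop_take]

lemma ports_eq (cards : List (String × Bool × Bool)) (mode : Int) :
    tmpmake cards mode = tmpmake_alt cards mode := by
  unfold tmpmake tmpmake_alt
  have hps : cards.map (fun c => "GUI/image/" ++ pvKey mode c ++ ".jpg")
      = cards.map (pvItem mode) := by
    simp [pvItem, key_eq_buf]
  rw [hps, chunk3_eq]
  have hA := foldA_eq mode cards 0 [] [] [] []
  rw [Nat.cast_zero] at hA
  rw [hA]
  simp

-- ===== VERDICT (by name: the statement is the Claim_ definition above) =====
theorem tmpmake_spec : Claim_equal_tmpmake := by
  intro cards mode _ _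
  exact ports_eq cards mode
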